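-- pv_equiv track=rewrite | github.com/sekgobela-kevin/naval | source/naval/crawler.py | get_start_end_indexes
-- ===== SOURCE A (Python) =====
-- from typing import List, Type
--
-- def get_start_end_indexes(sections_texts: List[str]):
--     '''Returns start, end indexes from list of texts\n
--     sections_texts - list of texts for each section'''
--     start_end_indexes = []
--     # calculate star and end indexes from sections_texts
--     # start_index and end_index will be changed in loop
--     start_index = 0
--     end_index = 0
--     for sections_text in sections_texts:
--         # increment end index
--         # start index does not need to be incremented
--         end_index += len(sections_text)
--         start_end_indexes.append((start_index, end_index))
--         # increment start index to be used next
--         start_index += len(sections_text)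
--     return tuple(start_end_indexes)
-- ===== SOURCE B (Python) =====
-- def get_start_end_indexes(sections_texts):
--     '''Returns start, end indexes from list of texts\n
--     sections_texts - list of texts for each section'''
--     # divide and conquer: solve each half independently (offsets relative to
--     # the half's own start), then shift the right half by the left half's
--     # total length when merging; returns (pairs, total length) per segment
--     def go(seg):
--         if len(seg) == 0:
--             return [], 0
--         if len(seg) == 1:
--             n = len(seg[0])
--             return [(0, n)], n
--         mid = len(seg) // 2
--         left_pairs, left_len = go(seg[:mid])
--         right_pairs, right_len = go(seg[mid:])
--         merged = left_pairs + [(s + left_len, e + left_len)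
--                                for (s, e) in right_pairs]
--         return merged, left_len + right_len
--     return tuple(go(sections_texts)[0])
-- ===== Notes on version B (the rewrite author's own statement) =====
-- stated objective: alternative
-- what changed: B is a divide-and-conquer: it recursively solves each half of the list with offsets relative to the half's own start and shifts the right half's pairs by the left half's total length when merging, instead of A's forward loop with running start/end counters.
import Mathlib
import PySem

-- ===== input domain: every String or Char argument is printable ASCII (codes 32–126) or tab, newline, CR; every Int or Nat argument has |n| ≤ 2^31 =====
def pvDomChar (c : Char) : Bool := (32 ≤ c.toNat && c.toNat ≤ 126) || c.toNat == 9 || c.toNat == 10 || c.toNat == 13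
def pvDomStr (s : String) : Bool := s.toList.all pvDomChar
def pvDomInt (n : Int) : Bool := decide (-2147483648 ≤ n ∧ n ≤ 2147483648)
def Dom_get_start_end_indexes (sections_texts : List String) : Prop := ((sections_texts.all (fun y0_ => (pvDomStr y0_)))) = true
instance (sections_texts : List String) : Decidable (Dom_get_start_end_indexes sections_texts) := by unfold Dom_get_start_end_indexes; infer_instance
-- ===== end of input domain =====

-- B is a divide-and-conquer (solve halves relative to their own start, shift the right half on merge) instead of A's forward loop with running counters; alternative decomposition.

-- ===== PORT A =====
-- state = (start_end_indexes, start_index, end_index)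
def get_start_end_indexes (sections_texts : List String) : List (Int × Int) :=
  (sections_texts.foldl
    (fun (st : List (Int × Int) × Int × Int) sections_text =>
      let end_index := st.2.2 + PySem.Str.len sections_text
      (st.1 ++ [(st.2.1, end_index)], st.2.1 + PySem.Str.len sections_text, end_index))
    ([], 0, 0)).1

-- ===== PORT B =====
-- helper 'go' of Source B: returns (pairs relative to the segment's start, total length)
def pvGo : List String → List (Int × Int) × Int
  | [] => ([], 0)
  | [t] => ([(0, PySem.Str.len t)], PySem.Str.len t)
  | t1 :: t2 :: ts =>
    let seg := t1 :: t2 :: ts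
    let mid := seg.length / 2
    let L := pvGo (seg.take mid)
    let R := pvGo (seg.drop mid)
    (L.1 ++ R.1.map (fun p => (p.1 + L.2, p.2 + L.2)), L.2 + R.2)
termination_by seg => seg.length
decreasing_by all_goals simp; omega

def get_start_end_indexes_alt (sections_texts : List String) : List (Int × Int) :=
  (pvGo sections_texts).1

-- ===== PRECONDITION & SPEC =====
def Spec_get_start_end_indexes (sections_texts : List String) (out : List (Int × Int)) : Prop := out = get_start_end_indexes_alt sections_texts
instance (sections_texts : List String) (out : List (Int × Int)) : Decidable (Spec_get_start_end_indexes sections_texts out) := by unfold Spec_get_start_end_indexes; infer_instance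

-- ===== CLAIM (what is proved, stated in full; the proofs are below) =====
def Claim_equal_get_start_end_indexes : Prop := ∀ (sections_texts : List String), Dom_get_start_end_indexes sections_texts → Spec_get_start_end_indexes sections_texts (get_start_end_indexes sections_texts)

-- ===== LEMMAS AND PROOFS =====

-- the (start, end) pairs starting at offset s, and the total length
def pvPairsFrom (s : Int) : List String → List (Int × Int)
  | [] => []
  | t :: ts => (s, s + PySem.Str.len t) :: pvPairsFrom (s + PySem.Str.len t) ts

def pvSumLen : List String → Int
  | [] => 0
  | t :: ts => PySem.Str.len t + pvSumLen ts

theorem pvFoldA (xs : List String) : ∀ (acc : List (Int × Int)) (s : Int),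
    (xs.foldl
      (fun (st : List (Int × Int) × Int × Int) t =>
        let e := st.2.2 + PySem.Str.len t
        (st.1 ++ [(st.2.1, e)], st.2.1 + PySem.Str.len t, e))
      (acc, s, s)).1 = acc ++ pvPairsFrom s xs := by
  induction xs with
  | nil => intro acc s; simp [pvPairsFrom]
  | cons t ts ih =>
    intro acc s
    simp only [List.foldl_cons, pvPairsFrom]
    rw [ih]
    simp

theorem pvShift (xs : List String) : ∀ (s d : Int),
    (pvPairsFrom s xs).map (fun p => (p.1 + d, p.2 + d)) = pvPairsFrom (s + d) xs := by
  induction xs with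
  | nil => intro s d; simp [pvPairsFrom]
  | cons t ts ih =>
    intro s d
    simp only [pvPairsFrom, List.map_cons, ih]
    have h : s + PySem.Str.len t + d = s + d + PySem.Str.len t := by ring
    rw [h]

theorem pvPairsFrom_append (xs : List String) : ∀ (ys : List String) (s : Int),
    pvPairsFrom s (xs ++ ys) = pvPairsFrom s xs ++ pvPairsFrom (s + pvSumLen xs) ys := by
  induction xs with
  | nil => intro ys s; simp [pvPairsFrom, pvSumLen]
  | cons t ts ih =>
    intro ys s
    simp only [List.cons_append, pvPairsFrom, pvSumLen, ih]
    have h : s + PySem.Str.len t + pvSumLen ts = s + (PySem.Str.len t + pvSumLen ts) := by ring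
    rw [h]

theorem pvSumLen_append (xs ys : List String) :
    pvSumLen (xs ++ ys) = pvSumLen xs + pvSumLen ys := by
  induction xs with
  | nil => simp [pvSumLen]
  | cons t ts ih => simp only [List.cons_append, pvSumLen, ih]; ring

theorem pvPairsFrom_append0 (xs ys : List String) :
    pvPairsFrom 0 (xs ++ ys) = pvPairsFrom 0 xs ++ pvPairsFrom (pvSumLen xs) ys := by
  rw [pvPairsFrom_append]; norm_num

theorem pvGo_eq (seg : List String) : pvGo seg = (pvPairsFrom 0 seg, pvSumLen seg) := by
  induction seg using pvGo.induct with
  | case1 => simp [pvGo, pvPairsFrom, pvSumLen]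
  | case2 t => simp [pvGo, pvPairsFrom, pvSumLen]
  | case3 t1 t2 ts seg mid ih1 ih2 =>
    have ih1' : pvGo (List.take ((t1 :: t2 :: ts).length / 2) (t1 :: t2 :: ts))
        = (pvPairsFrom 0 (List.take ((t1 :: t2 :: ts).length / 2) (t1 :: t2 :: ts)),
           pvSumLen (List.take ((t1 :: t2 :: ts).length / 2) (t1 :: t2 :: ts))) := ih1
    have ih2' : pvGo (List.drop ((t1 :: t2 :: ts).length / 2) (t1 :: t2 :: ts))
        = (pvPairsFrom 0 (List.drop ((t1 :: t2 :: ts).length / 2) (t1 :: t2 :: ts)),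
           pvSumLen (List.drop ((t1 :: t2 :: ts).length / 2) (t1 :: t2 :: ts))) := ih2
    rw [pvGo, ih1', ih2']
    simp only [pvShift, zero_add]
    rw [← pvPairsFrom_append0, ← pvSumLen_append, List.take_append_drop]

-- ===== VERDICT (by name: the statement is the Claim_ definition above) =====
theorem get_start_end_indexes_spec : Claim_equal_get_start_end_indexes := by
  intro xs _
  show get_start_end_indexes xs = get_start_end_indexes_alt xs
  unfold get_start_end_indexes get_start_end_indexes_alt
  rw [pvFoldA xs [] 0, pvGo_eq]
  simp
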